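-- pv_equiv track=rewrite | github.com/specmatic/labs-tests | filters/run.py | set_openapi_filter
-- ===== SOURCE A (Python) =====
-- def set_openapi_filter(content: str, filter_expr: str) -> str:
--     lines = content.splitlines()
--
--     openapi_idx = None
--     for idx, line in enumerate(lines):
--         if line.strip() == "openapi:":
--             openapi_idx = idx
--             break
--
--     if openapi_idx is None:
--         raise ValueError("Could not locate 'openapi:' block in specmatic.yaml")
--
--     openapi_indent = len(lines[openapi_idx]) - len(lines[openapi_idx].lstrip(" "))
--     block_end = len(lines)
--     for idx in range(openapi_idx + 1, len(lines)):
--         stripped = lines[idx].strip()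
--         if not stripped:
--             continue
--         current_indent = len(lines[idx]) - len(lines[idx].lstrip(" "))
--         if current_indent <= openapi_indent:
--             block_end = idx
--             break
--
--     filter_indent = openapi_indent + 2
--     filter_prefix = (" " * filter_indent) + "filter:"
--     for idx in range(openapi_idx + 1, block_end):
--         if lines[idx].lstrip(" ").startswith("filter:"):
--             lines[idx] = f'{filter_prefix} "{filter_expr}"'
--             return "\n".join(lines) + ("\n" if content.endswith("\n") else "")
--
--     insert_at = block_end
--     lines.insert(insert_at, f'{filter_prefix} "{filter_expr}"')
--     return "\n".join(lines) + ("\n" if content.endswith("\n") else "")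
-- ===== SOURCE B (Python) =====
-- def set_openapi_filter(content: str, filter_expr: str) -> str:
--     # Streaming state machine over the lines: emit each line into `out` while in
--     # states before -> block -> after; no index arithmetic, ranges or slices.
--     out = []
--     state = "before"
--     indent = 0
--     new_line = ""
--     handled = False
--     for line in content.splitlines():
--         if state == "before":
--             if line.strip() == "openapi:":
--                 state = "block"
--                 indent = len(line) - len(line.lstrip(" "))
--                 new_line = " " * (indent + 2) + 'filter: "' + filter_expr + '"'
--             out.append(line)
--         elif state == "block":
--             if line.strip() != "" and len(line) - len(line.lstrip(" ")) <= indent: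
--                 if not handled:
--                     out.append(new_line)
--                     handled = True
--                 out.append(line)
--                 state = "after"
--             elif not handled and line.lstrip(" ").startswith("filter:"):
--                 out.append(new_line)
--                 handled = True
--             else:
--                 out.append(line)
--         else:
--             out.append(line)
--     if state == "before":
--         raise ValueError("Could not locate 'openapi:' block in specmatic.yaml")
--     if not handled:
--         out.append(new_line)
--     return "\n".join(out) + ("\n" if content.endswith("\n") else "")
-- ===== Notes on version B (the rewrite author's own statement) =====
-- stated objective: alternative
-- what changed: A's three staged index scans (find openapi index, scan a range for block_end, scan a second range for a filter line) plus list.insert/index assignment are replaced by a single streaming state machine (states before/block/after) that emits each output line as it passes over the input, with no indices, ranges, slices or in-place mutation.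
import Mathlib
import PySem

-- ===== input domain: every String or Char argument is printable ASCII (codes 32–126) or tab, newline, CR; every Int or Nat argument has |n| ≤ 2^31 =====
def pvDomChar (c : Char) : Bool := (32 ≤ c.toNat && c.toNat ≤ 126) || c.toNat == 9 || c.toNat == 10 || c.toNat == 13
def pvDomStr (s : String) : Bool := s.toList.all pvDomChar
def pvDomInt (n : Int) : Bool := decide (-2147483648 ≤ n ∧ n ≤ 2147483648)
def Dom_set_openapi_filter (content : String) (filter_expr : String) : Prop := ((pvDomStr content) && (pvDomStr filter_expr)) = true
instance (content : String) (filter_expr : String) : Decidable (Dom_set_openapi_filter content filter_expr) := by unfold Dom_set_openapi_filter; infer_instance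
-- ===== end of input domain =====

-- B replaces A's three index-range scans with one streaming state machine over the lines (objective: alternative); same return value wherever A returns.

-- ===== PORT A =====

-- exact port of `.lstrip(" ")` (drop leading space characters only)
def pvLstripSp (cs : List Char) : List Char := cs.dropWhile (· == ' ')

-- len(line) - len(line.lstrip(" "))
def pvIndent (s : String) : Nat := s.toList.length - (pvLstripSp s.toList).length

-- line.lstrip(" ").startswith("filter:")
def pvIsFilterLine (l : String) : Bool := PySem.Chars.startswith (pvLstripSp l.toList) "filter:".toList

-- f'{filter_prefix} "{filter_expr}"' with filter_prefix = " " * (indent+2) + "filter:"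
def pvNewFilterLine (oind : Nat) (filter_expr : String) : String :=
  String.ofList (List.replicate (oind + 2) ' ' ++ "filter: \"".toList ++ filter_expr.toList ++ ['"'])

-- '"\n".join(lines) + ("\n" if content.endswith("\n") else "")' (identical line in both Pythons)
def pvFinish (content : String) (ls : List String) : String :=
  PySem.Str.join "\n" ls ++ (if PySem.Str.endswith content "\n" then "\n" else "")

-- A's first loop: for idx, line in enumerate(lines): if line.strip() == "openapi:": break
def aFindOpenapi : List String → Nat → Option Nat
  | [], _ => none
  | l :: rest, idx => if PySem.Str.strip l = "openapi:" then some idx else aFindOpenapi rest (idx + 1)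

-- A's second loop over range(openapi_idx+1, len(lines)) computing block_end
def aBlockEnd (lines : List String) (oind : Nat) : List Nat → Nat
  | [] => lines.length
  | i :: rest =>
    if PySem.Str.strip (lines.getD i "") = "" then aBlockEnd lines oind rest
    else if pvIndent (lines.getD i "") ≤ oind then i
    else aBlockEnd lines oind rest

-- A's third loop over range(openapi_idx+1, block_end) (early return becomes the found index)
def aFindFilter (lines : List String) : List Nat → Option Nat
  | [] => none
  | i :: rest => if pvIsFilterLine (lines.getD i "") then some i else aFindFilter lines rest

def set_openapi_filter (content : String) (filter_expr : String) : String :=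
  let lines := PySem.Str.splitlines content
  match aFindOpenapi lines 0 with
  | none => ""   -- A raises ValueError here; excluded by Pre_
  | some o =>
    let oind := pvIndent (lines.getD o "")
    let blockEnd := aBlockEnd lines oind (List.range' (o + 1) (lines.length - (o + 1)))
    let newLine := pvNewFilterLine oind filter_expr
    match aFindFilter lines (List.range' (o + 1) (blockEnd - (o + 1))) with
    | some i => pvFinish content (lines.set i newLine)
    | none => pvFinish content (PySem.List.insert lines (blockEnd : Int) newLine)

-- ===== PORT B =====

-- B's state machine states: before the openapi line / inside its block / after the block
inductive BSt
  | before
  | block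
  | after
deriving DecidableEq, Repr

-- B's single for-loop: one step per line, carrying (state, indent, new_line, handled, out)
def bLoop (fe : String) : List String → BSt → Nat → String → Bool → List String → BSt × String × Bool × List String
  | [], st, _, nl, h, out => (st, nl, h, out)
  | l :: rest, BSt.before, ind, nl, h, out =>
    if PySem.Str.strip l = "openapi:" then
      bLoop fe rest BSt.block (pvIndent l) (pvNewFilterLine (pvIndent l) fe) h (out ++ [l])
    else bLoop fe rest BSt.before ind nl h (out ++ [l])
  | l :: rest, BSt.block, ind, nl, h, out =>
    if PySem.Str.strip l ≠ "" ∧ pvIndent l ≤ ind then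
      bLoop fe rest BSt.after ind nl true ((if h then out else out ++ [nl]) ++ [l])
    else if h = false ∧ pvIsFilterLine l = true then
      bLoop fe rest BSt.block ind nl true (out ++ [nl])
    else bLoop fe rest BSt.block ind nl h (out ++ [l])
  | l :: rest, BSt.after, ind, nl, h, out => bLoop fe rest BSt.after ind nl h (out ++ [l])

def set_openapi_filter_alt (content : String) (filter_expr : String) : String :=
  let r := bLoop filter_expr (PySem.Str.splitlines content) BSt.before 0 "" false []
  if r.1 = BSt.before then ""   -- B raises ValueError here; excluded by Pre_
  else pvFinish content (if r.2.2.1 then r.2.2.2 else r.2.2.2 ++ [r.2.1])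

-- ===== PRECONDITION & SPEC =====
-- Pre_ excludes exactly the inputs with no line stripping to "openapi:", where A raises ValueError (B raises it too).
def Pre_set_openapi_filter (content : String) (filter_expr : String) : Prop :=
  (PySem.Str.splitlines content).any (fun l => PySem.Str.strip l == "openapi:") = true
instance (content : String) (filter_expr : String) : Decidable (Pre_set_openapi_filter content filter_expr) := by unfold Pre_set_openapi_filter; infer_instance

def pvWitness_set_openapi_filter : String × String := ("openapi:\n  specs: a.yaml\n", "x > 1")

def Spec_set_openapi_filter (content : String) (filter_expr : String) (out : String) : Prop := out = set_openapi_filter_alt content filter_expr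
instance (content : String) (filter_expr : String) (out : String) : Decidable (Spec_set_openapi_filter content filter_expr out) := by unfold Spec_set_openapi_filter; infer_instance

-- ===== CLAIM (what is proved, stated in full; the proofs are below) =====
def Claim_equal_set_openapi_filter : Prop := ∀ (content : String) (filter_expr : String), Dom_set_openapi_filter content filter_expr → Pre_set_openapi_filter content filter_expr → Spec_set_openapi_filter content filter_expr (set_openapi_filter content filter_expr)

-- ===== LEMMAS AND PROOFS =====

-- the stop index of A's second loop, as a function of the suffix list after the openapi line
def endIdx (ind : Nat) : List String → Nat
  | [] => 0
  | l :: rest => if PySem.Str.strip l ≠ "" ∧ pvIndent l ≤ ind then 0 else endIdx ind rest + 1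

-- the combined effect of A's replace-or-insert on that suffix list
def blockRes (ind : Nat) (nl : String) (ds : List String) : List String :=
  match (ds.take (endIdx ind ds)).findIdx? pvIsFilterLine with
  | some j => ds.set j nl
  | none => ds.take (endIdx ind ds) ++ nl :: ds.drop (endIdx ind ds)

theorem endIdx_le (ind : Nat) (ds : List String) : endIdx ind ds ≤ ds.length := by
  induction ds with
  | nil => simp [endIdx]
  | cons d rest ih =>
    simp only [endIdx]
    split <;> simp <;> omega

theorem bLoop_after (fe : String) (ds : List String) (ind : Nat) (nl : String) (h : Bool)
    (out : List String) : bLoop fe ds BSt.after ind nl h out = (BSt.after, nl, h, out ++ ds) := by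
  induction ds generalizing out with
  | nil => simp [bLoop]
  | cons d rest ih => simp [bLoop, ih]

theorem bLoop_block_handled (fe : String) (ds : List String) (ind : Nat) (nl : String)
    (out : List String) :
    (bLoop fe ds BSt.block ind nl true out).1 ≠ BSt.before ∧
    (bLoop fe ds BSt.block ind nl true out).2 = (nl, true, out ++ ds) := by
  induction ds generalizing out with
  | nil => simp [bLoop]
  | cons d rest ih =>
    simp only [bLoop]
    by_cases hs : PySem.Str.strip d ≠ "" ∧ pvIndent d ≤ ind
    · rw [if_pos hs, bLoop_after]; simp
    · rw [if_neg hs, if_neg (by simp)]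
      simpa using ih (out ++ [d])

theorem bLoop_block (fe : String) (ds : List String) (ind : Nat) (nl : String)
    (out : List String) :
    (bLoop fe ds BSt.block ind nl false out).1 ≠ BSt.before ∧
    (bLoop fe ds BSt.block ind nl false out).2.1 = nl ∧
    (if (bLoop fe ds BSt.block ind nl false out).2.2.1
      then (bLoop fe ds BSt.block ind nl false out).2.2.2
      else (bLoop fe ds BSt.block ind nl false out).2.2.2 ++ [nl])
      = out ++ blockRes ind nl ds := by
  induction ds generalizing out with
  | nil => simp [bLoop, blockRes, endIdx]
  | cons d rest ih =>
    simp only [bLoop]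
    by_cases hs : PySem.Str.strip d ≠ "" ∧ pvIndent d ≤ ind
    · rw [if_pos hs, bLoop_after]
      simp [blockRes, endIdx, if_pos hs]
    · rw [if_neg hs]
      have hend : endIdx ind (d :: rest) = endIdx ind rest + 1 := by
        simp [endIdx, if_neg hs]
      by_cases hf : pvIsFilterLine d = true
      · rw [if_pos (show (True ∧ pvIsFilterLine d = true) from ⟨trivial, hf⟩)]
        have hb := bLoop_block_handled fe rest ind nl (out ++ [nl])
        have h2 := hb.2
        refine ⟨hb.1, ?_, ?_⟩
        · rw [h2]
        · rw [h2]
          simp only [blockRes, hend, List.take_succ_cons, List.findIdx?_cons, hf, if_pos]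
          simp
      · rw [if_neg (by simp [hf])]
        have ihr := ih (out ++ [d])
        refine ⟨ihr.1, ihr.2.1, ?_⟩
        rw [ihr.2.2]
        have hres : blockRes ind nl (d :: rest) = d :: blockRes ind nl rest := by
          simp only [blockRes, hend, List.take_succ_cons, List.findIdx?_cons, hf,
            if_neg (by simp : ¬ (false = true))]
          cases hfi : (rest.take (endIdx ind rest)).findIdx? pvIsFilterLine with
          | none => simp
          | some j => simp
        simp [hres]

theorem bLoop_before (fe : String) (pre rest : List String) (ind : Nat) (nl : String) (h : Bool)
    (out : List String) (hpre : ∀ l ∈ pre, PySem.Str.strip l ≠ "openapi:") :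
    bLoop fe (pre ++ rest) BSt.before ind nl h out = bLoop fe rest BSt.before ind nl h (out ++ pre) := by
  induction pre generalizing out with
  | nil => simp
  | cons p pre' ih =>
    have hp : PySem.Str.strip p ≠ "openapi:" := hpre p (by simp)
    simp only [List.cons_append, bLoop, if_neg hp]
    rw [ih (out ++ [p]) (fun l hl => hpre l (by simp [hl]))]
    simp

-- A's first loop decomposes the line list at the first match
theorem aFindOpenapi_decomp (ls : List String) (k o : Nat) (h : aFindOpenapi ls k = some o) :
    ∃ pre l₀ suf, ls = pre ++ l₀ :: suf ∧ k + pre.length = o ∧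
      PySem.Str.strip l₀ = "openapi:" ∧ ∀ l ∈ pre, PySem.Str.strip l ≠ "openapi:" := by
  induction ls generalizing k with
  | nil => simp [aFindOpenapi] at h
  | cons l rest ih =>
    simp only [aFindOpenapi] at h
    by_cases hl : PySem.Str.strip l = "openapi:"
    · rw [if_pos hl] at h
      exact ⟨[], l, rest, by simp, by simpa using h, hl, by simp⟩
    · rw [if_neg hl] at h
      obtain ⟨pre, l₀, suf, h1, h2, h3, h4⟩ := ih (k + 1) h
      refine ⟨l :: pre, l₀, suf, by simp [h1], by simp; omega, h3, ?_⟩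
      intro x hx
      rcases List.mem_cons.mp hx with hx | hx
      · rw [hx]; exact hl
      · exact h4 x hx

theorem rangeBlockEnd (L : List String) (ind : Nat) (n a : Nat) (hn : a + n = L.length) :
    aBlockEnd L ind (List.range' a n) = a + endIdx ind (L.drop a) := by
  induction n generalizing a with
  | zero =>
    have : L.drop a = [] := by
      apply List.drop_eq_nil_of_le; omega
    simp [aBlockEnd, this, endIdx]; omega
  | succ n ihn =>
    have ha : a < L.length := by omega
    have hdrop : L.drop a = L[a] :: L.drop (a + 1) := List.drop_eq_getElem_cons ha
    have hgd : L.getD a "" = L[a] := by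
      simp [List.getD, List.getElem?_eq_getElem ha]
    rw [List.range'_succ]
    simp only [aBlockEnd, hgd, hdrop, endIdx]
    by_cases hb : PySem.Str.strip L[a] = ""
    · rw [if_pos hb, if_neg (by simp [hb]), ihn (a + 1) (by omega)]; omega
    · rw [if_neg hb]
      by_cases hi : pvIndent L[a] ≤ ind
      · rw [if_pos hi, if_pos ⟨hb, hi⟩]; omega
      · rw [if_neg hi, if_neg (by tauto), ihn (a + 1) (by omega)]; omega

theorem rangeFilter (L : List String) (m a : Nat) (hm : a + m ≤ L.length) :
    aFindFilter L (List.range' a m) = (((L.drop a).take m).findIdx? pvIsFilterLine).map (· + a) := by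
  induction m generalizing a with
  | zero => simp [aFindFilter]
  | succ m ihm =>
    have ha : a < L.length := by omega
    have hdrop : L.drop a = L[a] :: L.drop (a + 1) := List.drop_eq_getElem_cons ha
    have hgd : L.getD a "" = L[a] := by
      simp [List.getD, List.getElem?_eq_getElem ha]
    rw [List.range'_succ]
    simp only [aFindFilter, hgd, hdrop, List.take_succ_cons, List.findIdx?_cons]
    by_cases hf : pvIsFilterLine L[a] = true
    · simp [hf]
    · rw [if_neg hf, ihm (a + 1) (by omega),
        if_neg (by simpa using hf)]
      cases hfi : ((L.drop (a + 1)).take m).findIdx? pvIsFilterLine with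
      | none => simp
      | some j => simp; omega

theorem getD_append_cons {α : Type} [Inhabited α] (pre : List α) (x : α) (suf : List α) (d : α) :
    (pre ++ x :: suf).getD pre.length d = x := by
  induction pre with
  | nil => simp [List.getD]
  | cons p pre' ih => simpa [List.getD] using ih

theorem drop_append_cons {α : Type} (pre : List α) (x : α) (suf : List α) :
    (pre ++ x :: suf).drop (pre.length + 1) = suf := by
  induction pre with
  | nil => simp
  | cons p pre' ih => simpa using ih

theorem set_append_cons {α : Type} (pre : List α) (x : α) (suf : List α) (j : Nat) (v : α) :
    (pre ++ x :: suf).set (pre.length + 1 + j) v = pre ++ x :: suf.set j v := by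
  induction pre with
  | nil => rw [show ([] : List α).length + 1 + j = j + 1 by simp only [List.length_nil]; omega]; simp
  | cons p pre' ih =>
    have : p :: pre' ++ x :: suf = p :: (pre' ++ x :: suf) := by simp
    rw [this]
    have harith : (p :: pre').length + 1 + j = (pre'.length + 1 + j) + 1 := by simp; omega
    rw [harith, List.set_cons_succ, ih]
    simp

theorem take_append_cons {α : Type} (pre : List α) (x : α) (suf : List α) (e : Nat) :
    (pre ++ x :: suf).take (pre.length + 1 + e) = pre ++ x :: suf.take e := by
  induction pre with
  | nil => rw [show ([] : List α).length + 1 + e = e + 1 by simp only [List.length_nil]; omega]; simp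
  | cons p pre' ih =>
    have harith : (p :: pre').length + 1 + e = (pre'.length + 1 + e) + 1 := by simp; omega
    rw [harith]
    simpa using ih

theorem drop_append_cons' {α : Type} (pre : List α) (x : α) (suf : List α) (e : Nat) :
    (pre ++ x :: suf).drop (pre.length + 1 + e) = suf.drop e := by
  induction pre with
  | nil => rw [show ([] : List α).length + 1 + e = e + 1 by simp only [List.length_nil]; omega]; simp
  | cons p pre' ih =>
    have harith : (p :: pre').length + 1 + e = (pre'.length + 1 + e) + 1 := by simp; omega
    rw [harith]
    simpa using ih


theorem aFindOpenapi_of_any (ls : List String) (k : Nat)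
    (h : ls.any (fun l => PySem.Str.strip l == "openapi:") = true) :
    ∃ o, aFindOpenapi ls k = some o := by
  induction ls generalizing k with
  | nil => simp at h
  | cons l rest ih =>
    by_cases hl : PySem.Str.strip l = "openapi:"
    · exact ⟨k, by simp [aFindOpenapi, hl]⟩
    · have hrest : rest.any (fun l => PySem.Str.strip l == "openapi:") = true := by
        simp only [List.any_cons, Bool.or_eq_true] at h
        rcases h with h | h
        · exact absurd (by simpa using h) hl
        · exact h
      obtain ⟨o, ho⟩ := ih (k + 1) hrest
      exact ⟨o, by simp [aFindOpenapi, hl, ho]⟩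

-- ===== VERDICT (by name: the statement is the Claim_ definition above) =====
theorem set_openapi_filter_spec : Claim_equal_set_openapi_filter := by
  intro content fe _hdom hpre
  unfold Spec_set_openapi_filter
  unfold Pre_set_openapi_filter at hpre
  obtain ⟨o, ho⟩ := aFindOpenapi_of_any (PySem.Str.splitlines content) 0 hpre
  obtain ⟨pre, l₀, suf, hdec, hlen, hstrip, hnom⟩ :=
    aFindOpenapi_decomp (PySem.Str.splitlines content) 0 o ho
  simp only [Nat.zero_add] at hlen
  have hlenL : (PySem.Str.splitlines content).length = pre.length + 1 + suf.length := by
    rw [hdec]; simp; omega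
  have hgd : (PySem.Str.splitlines content).getD o "" = l₀ := by
    rw [hdec, ← hlen]; exact getD_append_cons pre l₀ suf ""
  have hele : endIdx (pvIndent l₀) suf ≤ suf.length := endIdx_le (pvIndent l₀) suf
  have hdropo1 : (PySem.Str.splitlines content).drop (o + 1) = suf := by
    rw [hdec, ← hlen]; exact drop_append_cons pre l₀ suf
  have hbe : aBlockEnd (PySem.Str.splitlines content) (pvIndent l₀)
      (List.range' (o + 1) ((PySem.Str.splitlines content).length - (o + 1)))
      = o + 1 + endIdx (pvIndent l₀) suf := by
    rw [rangeBlockEnd _ _ _ (o + 1) (by omega), hdropo1]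
  have hff : aFindFilter (PySem.Str.splitlines content)
      (List.range' (o + 1) (endIdx (pvIndent l₀) suf))
      = ((suf.take (endIdx (pvIndent l₀) suf)).findIdx? pvIsFilterLine).map (· + (o + 1)) := by
    rw [rangeFilter _ (endIdx (pvIndent l₀) suf) (o + 1) (by omega), hdropo1]
  have hbl := bLoop_block fe suf (pvIndent l₀) (pvNewFilterLine (pvIndent l₀) fe) (pre ++ [l₀])
  have hstart : bLoop fe (PySem.Str.splitlines content) BSt.before 0 "" false []
      = bLoop fe suf BSt.block (pvIndent l₀) (pvNewFilterLine (pvIndent l₀) fe) false (pre ++ [l₀]) := by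
    rw [hdec, bLoop_before fe pre (l₀ :: suf) 0 "" false [] hnom]
    simp [bLoop, hstrip]
  simp only [set_openapi_filter, set_openapi_filter_alt, ho, hstart, hgd, hbe,
    Nat.add_sub_cancel_left, hff]
  rw [if_neg hbl.1, hbl.2.1]
  cases hfi : (suf.take (endIdx (pvIndent l₀) suf)).findIdx? pvIsFilterLine with
  | some j =>
    simp only [Option.map_some]
    rw [hbl.2.2]
    have hres : blockRes (pvIndent l₀) (pvNewFilterLine (pvIndent l₀) fe) suf
        = suf.set j (pvNewFilterLine (pvIndent l₀) fe) := by
      simp [blockRes, hfi]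
    rw [hres, hdec, show j + (o + 1) = pre.length + 1 + j by omega, set_append_cons]
    simp
  | none =>
    simp only [Option.map_none]
    rw [hbl.2.2]
    have hres : blockRes (pvIndent l₀) (pvNewFilterLine (pvIndent l₀) fe) suf
        = suf.take (endIdx (pvIndent l₀) suf) ++ pvNewFilterLine (pvIndent l₀) fe
          :: suf.drop (endIdx (pvIndent l₀) suf) := by
      simp [blockRes, hfi]
    rw [hres, PySem.List.insert_natCast _ _ _ (by omega), hdec,
      show o + 1 + endIdx (pvIndent l₀) suf = pre.length + 1 + endIdx (pvIndent l₀) suf by omega,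
      take_append_cons, drop_append_cons']
    simp
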